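-- pv_equiv track=rewrite | github.com/valik94/PythonProblems | labs109.py | safe_squares_bishops
-- ===== SOURCE A (Python) =====
-- def safe_squares_bishops(n, bishops):
--     count = 0
--     for row in range(n):
--         for col in range(n):
--             if (row, col) not in bishops:
--                 for (br, bc) in bishops:
--                     if abs(br - row) == abs(bc - col):
--                         break
--                 else:
--                     count += 1
--     return count
-- ===== SOURCE B (Python) =====
-- def safe_squares_bishops(n, bishops):
--     diffs = {br - bc for (br, bc) in bishops}
--     sums = {br + bc for (br, bc) in bishops}
--     count = 0
--     for row in range(n):
--         for col in range(n):
--             if row - col not in diffs and row + col not in sums: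
--                 count += 1
--     return count
-- ===== Notes on version B (the rewrite author's own statement) =====
-- stated objective: alternative
-- what changed: B precomputes the sets of occupied difference- and sum-diagonals once and tests each cell by two set lookups, removing A's per-cell scan over the bishop list (and its redundant cell-occupancy membership test).
import Mathlib
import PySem

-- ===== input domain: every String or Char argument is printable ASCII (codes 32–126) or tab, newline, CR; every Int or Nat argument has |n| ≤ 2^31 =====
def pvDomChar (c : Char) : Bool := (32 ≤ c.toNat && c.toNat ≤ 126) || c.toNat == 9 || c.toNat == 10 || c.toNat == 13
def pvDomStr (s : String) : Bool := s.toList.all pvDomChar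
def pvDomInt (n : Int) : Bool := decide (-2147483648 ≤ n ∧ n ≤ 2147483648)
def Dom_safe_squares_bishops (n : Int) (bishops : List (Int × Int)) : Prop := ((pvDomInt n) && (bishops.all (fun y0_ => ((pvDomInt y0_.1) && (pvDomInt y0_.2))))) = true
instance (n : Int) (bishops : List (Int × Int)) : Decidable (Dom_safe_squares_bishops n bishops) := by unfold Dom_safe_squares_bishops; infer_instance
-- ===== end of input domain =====

-- B replaces A's per-cell scan over the bishop list by two precomputed diagonal sets (alternative decomposition; return value only, no side effects).


-- ===== PORT A =====
-- for (br, bc) in bishops: if abs(br-row)==abs(bc-col): break / else: (no break) — true iff some bishop attacks (row,col)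
def pvAttacked (row col : Int) : List (Int × Int) → Bool
  | [] => false
  | (br, bc) :: rest =>
      if (br - row).natAbs = (bc - col).natAbs then true else pvAttacked row col rest

def safe_squares_bishops (n : Int) (bishops : List (Int × Int)) : Int :=
  (PySem.List.pyRange 0 n 1).foldl (fun count row =>
    (PySem.List.pyRange 0 n 1).foldl (fun count col =>
      if (row, col) ∈ bishops then count
      else if pvAttacked row col bishops then count else count + 1) count) 0

-- ===== PORT B =====
def safe_squares_bishops_alt (n : Int) (bishops : List (Int × Int)) : Int :=
  let diffs : PySem.Set Int := PySem.Set.ofList (bishops.map (fun p => p.1 - p.2))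
  let sums : PySem.Set Int := PySem.Set.ofList (bishops.map (fun p => p.1 + p.2))
  (PySem.List.pyRange 0 n 1).foldl (fun count row =>
    (PySem.List.pyRange 0 n 1).foldl (fun count col =>
      if (row - col) ∉ diffs ∧ (row + col) ∉ sums then count + 1 else count) count) 0

-- ===== PRECONDITION & SPEC =====
def Spec_safe_squares_bishops (n : Int) (bishops : List (Int × Int)) (out : Int) : Prop := out = safe_squares_bishops_alt n bishops
instance (n : Int) (bishops : List (Int × Int)) (out : Int) : Decidable (Spec_safe_squares_bishops n bishops out) := by unfold Spec_safe_squares_bishops; infer_instance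

-- ===== CLAIM (what is proved, stated in full; the proofs are below) =====
def Claim_equal_safe_squares_bishops : Prop := ∀ (n : Int) (bishops : List (Int × Int)), Dom_safe_squares_bishops n bishops → Spec_safe_squares_bishops n bishops (safe_squares_bishops n bishops)

-- ===== LEMMAS AND PROOFS =====

-- |br-row| = |bc-col| iff the two cells share a difference- or a sum-diagonal
theorem pv_abs_iff (br bc row col : Int) :
    (br - row).natAbs = (bc - col).natAbs ↔ (br - bc = row - col ∨ br + bc = row + col) := by
  omega

theorem pvAttacked_iff (row col : Int) (bishops : List (Int × Int)) :
    pvAttacked row col bishops = true ↔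
      ((row - col) ∈ bishops.map (fun p => p.1 - p.2) ∨
       (row + col) ∈ bishops.map (fun p => p.1 + p.2)) := by
  induction bishops with
  | nil => simp [pvAttacked]
  | cons hd tl ih =>
      obtain ⟨br, bc⟩ := hd
      by_cases h : (br - row).natAbs = (bc - col).natAbs
      · simp only [pvAttacked, if_pos h, List.map_cons, List.mem_cons]
        rw [pv_abs_iff] at h
        constructor
        · intro _; rcases h with h | h
          · exact Or.inl (Or.inl h.symm)
          · exact Or.inr (Or.inl h.symm)
        · intro _; trivial
      · simp only [pvAttacked, if_neg h, List.map_cons, List.mem_cons]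
        rw [pv_abs_iff] at h
        push Not at h
        rw [ih]
        constructor
        · intro hm; rcases hm with hm | hm
          · exact Or.inl (Or.inr hm)
          · exact Or.inr (Or.inr hm)
        · rintro (hm | hm)
          · rcases hm with hm | hm
            · exact absurd hm.symm h.1
            · exact Or.inl hm
          · rcases hm with hm | hm
            · exact absurd hm.symm h.2
            · exact Or.inr hm

theorem pvAttacked_of_mem (row col : Int) (bishops : List (Int × Int))
    (h : (row, col) ∈ bishops) : pvAttacked row col bishops = true := by
  rw [pvAttacked_iff]
  exact Or.inl (List.mem_map.mpr ⟨(row, col), h, by ring⟩)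

theorem pv_cell_eq (bishops : List (Int × Int)) (row col count : Int) :
    (if (row, col) ∈ bishops then count
     else if pvAttacked row col bishops then count else count + 1) =
    (if (row - col) ∉ PySem.Set.ofList (bishops.map (fun p => p.1 - p.2)) ∧
        (row + col) ∉ PySem.Set.ofList (bishops.map (fun p => p.1 + p.2)) then count + 1
     else count) := by
  by_cases hatt : pvAttacked row col bishops = true
  · have hmem : ¬ ((row - col) ∉ PySem.Set.ofList (bishops.map (fun p => p.1 - p.2)) ∧
        (row + col) ∉ PySem.Set.ofList (bishops.map (fun p => p.1 + p.2))) := by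
      rw [pvAttacked_iff] at hatt
      simp only [PySem.Set.mem_ofList]
      tauto
    rw [if_neg hmem, hatt]
    split_ifs <;> simp_all
  · have hnb : (row, col) ∉ bishops := fun h => hatt (pvAttacked_of_mem _ _ _ h)
    have hmem : (row - col) ∉ PySem.Set.ofList (bishops.map (fun p => p.1 - p.2)) ∧
        (row + col) ∉ PySem.Set.ofList (bishops.map (fun p => p.1 + p.2)) := by
      simp only [PySem.Set.mem_ofList]
      constructor <;> intro hm <;> exact hatt ((pvAttacked_iff row col bishops).mpr (by tauto))
    rw [if_neg hnb, if_pos hmem]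
    simp [hatt]

-- ===== VERDICT (by name: the statement is the Claim_ definition above) =====
theorem safe_squares_bishops_spec : Claim_equal_safe_squares_bishops := by
  intro n bishops _
  unfold Spec_safe_squares_bishops safe_squares_bishops safe_squares_bishops_alt
  have hfun : (fun (count row : Int) =>
      (PySem.List.pyRange 0 n 1).foldl (fun count col =>
        if (row, col) ∈ bishops then count
        else if pvAttacked row col bishops then count else count + 1) count) =
      (fun (count row : Int) =>
      (PySem.List.pyRange 0 n 1).foldl (fun count col =>
        if (row - col) ∉ PySem.Set.ofList (bishops.map (fun p => p.1 - p.2)) ∧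
           (row + col) ∉ PySem.Set.ofList (bishops.map (fun p => p.1 + p.2)) then count + 1
        else count) count) := by
    funext count row
    congr 1
    funext count col
    exact pv_cell_eq bishops row col count
  rw [hfun]
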